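-- pv_equiv track=rewrite | github.com/sayspeak/wangyitest | 最长子序列.py | isl
-- ===== SOURCE A (Python) =====
-- def isl(t1):
--     length = len(t1)
--     temp = 0
--     for i in range(length):
--         if t1[i] == '(':
--             temp += 1
--         else:
--             temp -= 1
--         if temp < 0:
--             return 0
--     return 1
-- ===== SOURCE B (Python) =====
-- def isl(t1):
--     stack = []
--     for c in t1:
--         if c != '(' and stack and stack[-1] == '(':
--             stack.pop()
--         else:
--             stack.append(c)
--     return 1 if all(c == '(' for c in stack) else 0
-- ===== Notes on version B (the rewrite author's own statement) =====
-- stated objective: alternative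
-- what changed: Replaces the running counter with early return by a stack-based cancellation reduction: each closer cancels a pending opener on a stack, and the answer is read off the final reduced stack (1 iff no closer remains in it).
import Mathlib
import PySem

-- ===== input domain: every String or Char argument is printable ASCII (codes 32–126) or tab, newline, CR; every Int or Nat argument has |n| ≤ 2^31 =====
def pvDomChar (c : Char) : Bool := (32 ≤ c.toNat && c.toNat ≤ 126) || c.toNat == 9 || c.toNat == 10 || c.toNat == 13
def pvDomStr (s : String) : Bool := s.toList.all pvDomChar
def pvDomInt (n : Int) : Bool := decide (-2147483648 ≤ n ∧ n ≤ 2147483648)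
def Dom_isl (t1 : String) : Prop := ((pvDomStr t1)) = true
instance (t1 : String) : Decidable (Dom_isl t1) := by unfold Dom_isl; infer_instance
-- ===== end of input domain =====

-- B replaces A's counter-with-early-return by a stack-based cancellation reduction (alternative decomposition, same cost).

-- ===== PORT A =====
-- A's for-loop over the characters with the running counter `temp` and the early `return 0`.
def islLoop : List Char → Int → Int
  | [], _ => 1
  | c :: cs, temp =>
    let temp' := if c = '(' then temp + 1 else temp - 1
    if temp' < 0 then 0 else islLoop cs temp'

def isl (t1 : String) : Int := islLoop t1.toList 0

-- ===== PORT B =====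
-- one reduction step: a closer cancels a pending '(' on top of the stack, otherwise push
-- (Python appends/pops at the list's end; the port keeps the stack top at the list's head)
def islPush (st : List Char) (c : Char) : List Char :=
  match st with
  | t :: rest => if c ≠ '(' ∧ t = '(' then rest else c :: t :: rest
  | [] => [c]

def isl_alt (t1 : String) : Int :=
  if (t1.toList.foldl islPush []).all (fun c => c = '(') then 1 else 0

-- ===== PRECONDITION & SPEC =====
def Spec_isl (t1 : String) (out : Int) : Prop := out = isl_alt t1
instance (t1 : String) (out : Int) : Decidable (Spec_isl t1 out) := by unfold Spec_isl; infer_instance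

-- ===== CLAIM (what is proved, stated in full; the proofs are below) =====
def Claim_equal_isl : Prop := ∀ (t1 : String), Dom_isl t1 → Spec_isl t1 (isl t1)

-- ===== LEMMAS AND PROOFS =====

-- a stack already containing a non-'(' character never becomes all-'(' again
theorem islPush_bad (cs : List Char) (st : List Char) (h : ∃ x ∈ st, x ≠ '(') :
    ∃ x ∈ cs.foldl islPush st, x ≠ '(' := by
  induction cs generalizing st with
  | nil => simpa using h
  | cons c cs ih =>
    simp only [List.foldl_cons]
    apply ih
    obtain ⟨x, hx, hxne⟩ := h
    unfold islPush
    match st, hx with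
    | t :: rest, hx =>
      by_cases hc : c ≠ '(' ∧ t = '('
      · simp only [if_pos hc]
        rcases List.mem_cons.mp hx with rfl | hmem
        · exact absurd hc.2 hxne
        · exact ⟨x, hmem, hxne⟩
      · simp only [if_neg hc]
        exact ⟨x, by simp [List.mem_cons.mp hx], hxne⟩

-- invariant: when no dip has occurred, the stack is exactly `temp` copies of '('
theorem islLoop_eq_fold (cs : List Char) (n : Nat) :
    islLoop cs (n : Int) =
      (if (cs.foldl islPush (List.replicate n '(')).all (fun c => c = '(') then 1 else 0) := by
  induction cs generalizing n with
  | nil =>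
    simp only [islLoop, List.foldl_nil, List.all_eq_true]
    rw [if_pos]
    intro x h
    simp [List.eq_of_mem_replicate h]
  | cons c cs ih =>
    simp only [islLoop, List.foldl_cons]
    by_cases hc : c = '('
    · subst hc
      have hlt : ¬ ((n : Int) + 1 < 0) := by omega
      have hpush : islPush (List.replicate n '(') '(' = List.replicate (n + 1) '(' := by
        cases n <;> simp [islPush, List.replicate]
      have hcast : ((n : Int) + 1) = ((n + 1 : Nat) : Int) := by push_cast; ring
      simp only [if_pos rfl, if_true]
      rw [if_neg hlt]; simp only [List.foldl_cons, hpush, hcast, ih]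
    · simp only [if_neg hc]
      cases n with
      | zero =>
        have hlt : (0 : Int) - 1 < 0 := by omega
        simp only [Nat.cast_zero, hlt, if_true, List.replicate]
        have hbad : ∃ x ∈ cs.foldl islPush (islPush [] c), x ≠ '(' := by
          apply islPush_bad
          exact ⟨c, by simp [islPush], hc⟩
        obtain ⟨x, hx, hxne⟩ := hbad
        have : ¬ (cs.foldl islPush (islPush [] c)).all (fun c => c = '(') = true := by
          simp only [List.all_eq_true]
          intro h; exact hxne (by simpa using h x hx)
        simp [this]
      | succ m =>
        have hlt : ¬ (((m + 1 : Nat) : Int) - 1 < 0) := by push_cast; omega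
        have hpush : islPush (List.replicate (m + 1) '(') c = List.replicate m '(' := by
          simp [islPush, List.replicate, hc]
        have hcast : (((m + 1 : Nat) : Int) - 1) = ((m : Nat) : Int) := by push_cast; ring
        rw [if_neg hlt]; simp only [List.foldl_cons, hpush, hcast, ih]

-- ===== VERDICT (by name: the statement is the Claim_ definition above) =====
theorem isl_spec : Claim_equal_isl := by
  intro t1 _
  unfold Spec_isl isl isl_alt
  simpa using islLoop_eq_fold t1.toList 0
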